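-- pv_equiv track=rewrite | github.com/chyoan/Coding-Exercises | Python/w3resource/Python Basic/Programming Puzzles/filter_sum_digits.py | filter_sum
-- ===== SOURCE A (Python) =====
-- def filter_sum(lst):
--     str_list = [str(n) for n in lst]
--     sum_greater_than_zero = []
--     for num in str_list:
--         digits_sum = 0
--         i = 0
--         while i < len(num):
--             if num[i] == '-':
--                 digits_sum -= int(num[i+1])
--                 i += 2
--             else:
--                 digits_sum += int(num[i])
--                 i += 1
--         if digits_sum > 0:
--             sum_greater_than_zero.append(int(num))
--     return sum_greater_than_zero
-- ===== SOURCE B (Python) =====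
-- def filter_sum(lst):
--     def signed_digit_sum(s):
--         total = sum(int(c) for c in s if c != '-')
--         if s[0] == '-':
--             total -= 2 * int(s[1])
--         return total
--     return [int(s) for s in map(str, lst) if signed_digit_sum(s) > 0]
-- ===== Notes on version B (the rewrite author's own statement) =====
-- stated objective: simpler
-- what changed: Replaces A's index-advancing while loop (which skips two positions after a '-') by a single comprehension summing every digit character plus a closed-form sign correction (subtract twice the first digit when the string starts with '-'), and builds the result as one list comprehension.
import Mathlib
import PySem

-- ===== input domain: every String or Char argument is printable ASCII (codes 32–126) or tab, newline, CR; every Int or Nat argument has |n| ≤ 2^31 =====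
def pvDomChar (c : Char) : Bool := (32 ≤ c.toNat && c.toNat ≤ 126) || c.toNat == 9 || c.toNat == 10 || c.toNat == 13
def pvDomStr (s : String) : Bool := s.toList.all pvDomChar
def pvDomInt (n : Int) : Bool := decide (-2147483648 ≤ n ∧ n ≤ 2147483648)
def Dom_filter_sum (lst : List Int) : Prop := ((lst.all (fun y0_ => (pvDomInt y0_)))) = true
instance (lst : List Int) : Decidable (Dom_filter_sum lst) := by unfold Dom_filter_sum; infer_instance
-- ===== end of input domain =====

-- B replaces A's index-skipping while loop by one digit-sum comprehension plus a sign correction (objective: simpler).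

-- int(c) for a single character c (Python's int() applied to a one-character slice of the string)
def pyIntChar (c : Char) : Int := (PySem.Int.ofChars? [c]).getD 0

-- ===== PORT A =====
-- A's while loop over indices i (i += 2 after a '-', else i += 1), transcribed as recursion on the
-- not-yet-visited suffix of the char list (i only moves forward, so this is the same traversal).
-- On '-' as the LAST character Python would raise IndexError; that is unreachable for str(n) of an int,
-- the only strings this function ever builds.
def loopA : List Char → Int → Int
  | [], s => s
  | c :: rest, s =>
    if c = '-' then
      match rest with
      | [] => s            -- unreachable for str(int); Python raises IndexError here
      | d :: rest' => loopA rest' (s - pyIntChar d)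
    else loopA rest (s + pyIntChar c)

def filter_sum (lst : List Int) : List Int :=
  let str_list := lst.map PySem.Int.toChars
  str_list.foldl (fun acc num =>
    if loopA num 0 > 0 then acc ++ [(PySem.Int.ofChars? num).getD 0] else acc) []

-- ===== PORT B =====
-- total = sum(int(c) for c in s if c != '-'); if s[0] == '-': total -= 2*int(s[1])
def signed_digit_sum (s : List Char) : Int :=
  let total := ((s.filter (fun c => c ≠ '-')).map pyIntChar).sum
  if s.head? = some '-' then total - 2 * pyIntChar ((PySem.List.pyGet? s 1).getD '0') else total

def filter_sum_alt (lst : List Int) : List Int :=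
  ((lst.map PySem.Int.toChars).filter (fun s => signed_digit_sum s > 0)).map
    (fun s => (PySem.Int.ofChars? s).getD 0)

-- ===== PRECONDITION & SPEC =====
def Spec_filter_sum (lst : List Int) (out : List Int) : Prop := out = filter_sum_alt lst
instance (lst : List Int) (out : List Int) : Decidable (Spec_filter_sum lst out) := by unfold Spec_filter_sum; infer_instance

-- ===== CLAIM (what is proved, stated in full; the proofs are below) =====
def Claim_equal_filter_sum : Prop := ∀ (lst : List Int), Dom_filter_sum lst → Spec_filter_sum lst (filter_sum lst)

-- ===== LEMMAS AND PROOFS =====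

theorem digitChar_ne_dash (k : Nat) : Nat.digitChar k ≠ '-' := by
  match k with
  | 0 | 1 | 2 | 3 | 4 | 5 | 6 | 7 | 8 | 9 | 10 | 11 | 12 | 13 | 14 | 15 => decide
  | n + 16 => simp [Nat.digitChar]

theorem toDigitsCore_ne_dash (b f n : Nat) (acc : List Char) (h : ∀ c ∈ acc, c ≠ '-') :
    ∀ c ∈ Nat.toDigitsCore b f n acc, c ≠ '-' := by
  induction f generalizing n acc with
  | zero => simpa [Nat.toDigitsCore] using h
  | succ f ih =>
    intro c hc
    simp only [Nat.toDigitsCore] at hc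
    split at hc
    · rcases List.mem_cons.1 hc with h1 | h1
      · subst h1; exact digitChar_ne_dash _
      · exact h c h1
    · refine ih (n / b) _ ?_ c hc
      intro c' hc'
      rcases List.mem_cons.1 hc' with h1 | h1
      · subst h1; exact digitChar_ne_dash _
      · exact h c' h1

theorem toDigits_ne_dash (n : Nat) : ∀ c ∈ Nat.toDigits 10 n, c ≠ '-' :=
  toDigitsCore_ne_dash 10 (n + 1) n [] (by simp)

theorem toDigitsCore_ne_nil (b f n : Nat) (acc : List Char) (h : acc ≠ []) :
    Nat.toDigitsCore b f n acc ≠ [] := by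
  induction f generalizing n acc with
  | zero => simpa [Nat.toDigitsCore] using h
  | succ f ih =>
    simp only [Nat.toDigitsCore]
    split
    · simp
    · exact ih (n / b) _ (by simp)

theorem toDigits_ne_nil (n : Nat) : Nat.toDigits 10 n ≠ [] := by
  unfold Nat.toDigits
  simp only [Nat.toDigitsCore]
  split
  · simp
  · exact toDigitsCore_ne_nil 10 n (n / 10) _ (by simp)

-- A's loop on a dash-free suffix is a plain running sum.
theorem loopA_no_dash (cs : List Char) (h : ∀ c ∈ cs, c ≠ '-') (s : Int) :
    loopA cs s = s + (cs.map pyIntChar).sum := by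
  induction cs generalizing s with
  | nil => simp [loopA]
  | cons c rest ih =>
    have hc : c ≠ '-' := h c (List.mem_cons_self ..)
    rw [loopA.eq_def]
    simp only [if_neg hc]
    rw [ih (fun c' hc' => h c' (List.mem_cons_of_mem _ hc')) (s + pyIntChar c)]
    simp only [List.map_cons, List.sum_cons]
    ring

-- Per element: A's while-loop digit sum equals B's comprehension-with-correction.
theorem loopA_eq_signed (n : Int) : loopA (PySem.Int.toChars n) 0 = signed_digit_sum (PySem.Int.toChars n) := by
  unfold PySem.Int.toChars
  by_cases hn : n < 0
  · simp only [if_pos hn]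
    obtain ⟨d, rest, hdr⟩ : ∃ d rest, Nat.toDigits 10 n.natAbs = d :: rest := by
      cases h : Nat.toDigits 10 n.natAbs with
      | nil => exact absurd h (toDigits_ne_nil _)
      | cons d rest => exact ⟨d, rest, rfl⟩
    have hnd : ∀ c ∈ d :: rest, c ≠ '-' := hdr ▸ toDigits_ne_dash n.natAbs
    have hd : d ≠ '-' := hnd d (List.mem_cons_self ..)
    have hrest : ∀ c ∈ rest, c ≠ '-' := fun c hc => hnd c (List.mem_cons_of_mem _ hc)
    have hfilter : List.filter (fun c => !decide (c = '-')) rest = rest :=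
      List.filter_eq_self.2 (fun c hc => by simpa using hrest c hc)
    rw [hdr]
    have hA : loopA ('-' :: d :: rest) 0 = 0 - pyIntChar d + (rest.map pyIntChar).sum := by
      simp only [loopA, if_true]
      simp [loopA_no_dash rest hrest]
    rw [hA]
    simp [signed_digit_sum, hd, hfilter, PySem.List.pyGet?, PySem.List.pyIdx?]
    ring
  · simp only [if_neg hn]
    have hnd : ∀ c ∈ Nat.toDigits 10 n.toNat, c ≠ '-' := toDigits_ne_dash n.toNat
    have hfilter : List.filter (fun c => !decide (c = '-')) (Nat.toDigits 10 n.toNat) = Nat.toDigits 10 n.toNat :=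
      List.filter_eq_self.2 (fun c hc => by simpa using hnd c hc)
    have hhead : (Nat.toDigits 10 n.toNat).head? ≠ some '-' := by
      cases h : Nat.toDigits 10 n.toNat with
      | nil => simp
      | cons c rest =>
        have : c ≠ '-' := hnd c (h ▸ List.mem_cons_self ..)
        simp [this]
    rw [loopA_no_dash _ hnd]
    simp [signed_digit_sum, hfilter, hhead]

-- The append-an-element foldl of A is the filter-then-map of B (over the mapped string list).
theorem foldl_eq_filter_map (lst : List Int) (acc : List Int) :
    (lst.map PySem.Int.toChars).foldl (fun acc num =>
        if loopA num 0 > 0 then acc ++ [(PySem.Int.ofChars? num).getD 0] else acc) acc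
      = acc ++ ((lst.map PySem.Int.toChars).filter (fun s => signed_digit_sum s > 0)).map
          (fun s => (PySem.Int.ofChars? s).getD 0) := by
  induction lst generalizing acc with
  | nil => simp
  | cons n rest ih =>
    simp only [List.map_cons, List.foldl_cons, List.filter_cons]
    rw [loopA_eq_signed n]
    by_cases h : signed_digit_sum (PySem.Int.toChars n) > 0
    · simp only [decide_eq_true_eq, h, ih]
      simp
    · simp only [if_neg h, ih]
      simp [h]

-- ===== VERDICT (by name: the statement is the Claim_ definition above) =====
theorem filter_sum_spec : Claim_equal_filter_sum := by
  intro lst _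
  unfold Spec_filter_sum filter_sum filter_sum_alt
  simpa using foldl_eq_filter_map lst []
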